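-- pv_equiv track=rewrite | github.com/cosminneamtiu02/pdf-data-extraction | apps/backend/app/features/extraction/coordinates/sub_block_matcher.py | _collapse_whitespace_with_map
-- ===== SOURCE A (Python) =====
-- def _collapse_whitespace_with_map(text: str) -> tuple[str, list[int]]:
--     """Collapse runs of whitespace to a single space, tracking origin indices.
--
--     Returns `(normalized_text, mapping)` where `mapping[i]` is the index in
--     `text` that contributed the i-th character of `normalized_text`. For a
--     collapsed whitespace run, the mapping points at the FIRST character of the
--     run in `text` (the "leading edge" convention).
--     """
--     out_chars: list[str] = []
--     mapping: list[int] = []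
--     i = 0
--     n = len(text)
--     while i < n:
--         ch = text[i]
--         if ch.isspace():
--             out_chars.append(" ")
--             mapping.append(i)
--             i += 1
--             while i < n and text[i].isspace():
--                 i += 1
--         else:
--             out_chars.append(ch)
--             mapping.append(i)
--             i += 1
--     return "".join(out_chars), mapping
-- ===== SOURCE B (Python) =====
-- def _collapse_whitespace_with_map(text: str) -> tuple[str, list[int]]:
--     """Two-phase rewrite: split into maximal same-class runs, then emit."""
--     out_parts: list[str] = []
--     mapping: list[int] = []
--     for start, is_space, seg in _runs(text):
--         if is_space:
--             out_parts.append(" ")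
--             mapping.append(start)
--         else:
--             out_parts.append(seg)
--             mapping.extend(range(start, start + len(seg)))
--     return "".join(out_parts), mapping
--
--
-- def _runs(text: str) -> list[tuple[int, bool, str]]:
--     """Maximal runs of equal .isspace() class, as (start_index, is_space, segment)."""
--     runs: list[tuple[int, bool, str]] = []
--     pos = 0
--     n = len(text)
--     while pos < n:
--         is_space = text[pos].isspace()
--         end = pos + 1
--         while end < n and text[end].isspace() == is_space:
--             end += 1
--         runs.append((pos, is_space, text[pos:end]))
--         pos = end
--     return runs
-- ===== Notes on version B (the rewrite author's own statement) =====
-- stated objective: alternative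
-- what changed: A is a single index-driven while loop that skips whitespace runs character by character; B first splits the text into maximal same-whitespace-class runs (start, class, segment) and then emits each run wholesale (one space for a whitespace run, the segment plus a contiguous index range otherwise).
import Mathlib
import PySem

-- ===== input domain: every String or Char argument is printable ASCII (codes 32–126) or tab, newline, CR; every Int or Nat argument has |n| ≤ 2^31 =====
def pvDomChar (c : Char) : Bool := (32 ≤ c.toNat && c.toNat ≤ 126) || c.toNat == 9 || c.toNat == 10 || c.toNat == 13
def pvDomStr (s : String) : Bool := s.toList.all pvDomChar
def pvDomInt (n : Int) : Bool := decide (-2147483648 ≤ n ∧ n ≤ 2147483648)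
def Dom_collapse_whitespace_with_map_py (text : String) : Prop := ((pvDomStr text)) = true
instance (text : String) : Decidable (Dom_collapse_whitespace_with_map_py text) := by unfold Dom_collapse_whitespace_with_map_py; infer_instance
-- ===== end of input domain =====

-- B replaces A's single index-driven skip loop by a two-phase pass: group the text into
-- maximal same-whitespace-class runs, then emit each run wholesale (objective: alternative).

-- ===== PORT A =====
-- inner `while i < n and text[i].isspace(): i += 1` of A, on the remaining characters
def pvSkipWs : List Char → Int → List Char × Int
  | [], i => ([], i)
  | c :: rest, i =>
    if PySem.Chars.isspace c then pvSkipWs rest (i + 1) else (c :: rest, i)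

theorem pvSkipWs_fst_length_le : ∀ (l : List Char) (i : Int), (pvSkipWs l i).1.length ≤ l.length := by
  intro l
  induction l with
  | nil => intro i; simp [pvSkipWs]
  | cons c rest ih =>
    intro i
    by_cases h : PySem.Chars.isspace c = true <;> simp [pvSkipWs, h]
    · exact Nat.le_succ_of_le (ih (i + 1))

-- A's outer while loop over the remaining characters and the current index
def pvLoopA : List Char → Int → List Char × List Int
  | [], _ => ([], [])
  | ch :: rest, i =>
    if PySem.Chars.isspace ch then
      let p := pvSkipWs rest (i + 1)
      let r := pvLoopA p.1 p.2
      (' ' :: r.1, i :: r.2)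
    else
      let r := pvLoopA rest (i + 1)
      (ch :: r.1, i :: r.2)
termination_by l _ => l.length
decreasing_by
  · have := pvSkipWs_fst_length_le rest (i + 1); simp; omega
  · simp

def collapse_whitespace_with_map_py (text : String) : String × List Int :=
  let r := pvLoopA text.toList 0
  (String.mk r.1, r.2)

-- ===== PORT B =====
-- B's _runs: maximal runs of equal .isspace() class, as (start index, is_space, segment)
def pvRuns : List (Int × Char) → List (Int × Bool × List Char)
  | [] => []
  | (i, c) :: rest =>
    let k := PySem.Chars.isspace c
    let seg := rest.takeWhile (fun p => PySem.Chars.isspace p.2 == k)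
    let rest' := rest.dropWhile (fun p => PySem.Chars.isspace p.2 == k)
    (i, k, c :: seg.map Prod.snd) :: pvRuns rest'
termination_by l => l.length
decreasing_by
  have := List.length_dropWhile_le (fun p : Int × Char => PySem.Chars.isspace p.2 == PySem.Chars.isspace c) rest
  simp; omega

-- range(start, start + len) of B's mapping.extend
def pvRangeMap (i : Int) (n : Nat) : List Int := (List.range n).map (fun j => i + (j : Int))

def pvRunChars (r : Int × Bool × List Char) : List Char := if r.2.1 then [' '] else r.2.2
def pvRunMap (r : Int × Bool × List Char) : List Int := if r.2.1 then [r.1] else pvRangeMap r.1 r.2.2.length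

def collapse_whitespace_with_map_py_alt (text : String) : String × List Int :=
  let runs := pvRuns (PySem.List.enumerate text.toList 0)
  (String.mk (runs.flatMap pvRunChars), runs.flatMap pvRunMap)

-- ===== PRECONDITION & SPEC =====
def Spec_collapse_whitespace_with_map_py (text : String) (out : String × List Int) : Prop := out = collapse_whitespace_with_map_py_alt text
instance (text : String) (out : String × List Int) : Decidable (Spec_collapse_whitespace_with_map_py text out) := by unfold Spec_collapse_whitespace_with_map_py; infer_instance

-- ===== CLAIM (what is proved, stated in full; the proofs are below) =====
def Claim_equal_collapse_whitespace_with_map_py : Prop := ∀ (text : String), Dom_collapse_whitespace_with_map_py text → Spec_collapse_whitespace_with_map_py text (collapse_whitespace_with_map_py text)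

-- ===== LEMMAS AND PROOFS =====

theorem pvSkipWs_eq (l : List Char) : ∀ (i : Int),
    pvSkipWs l i = (l.dropWhile PySem.Chars.isspace,
      i + ((l.takeWhile PySem.Chars.isspace).length : Int)) := by
  induction l with
  | nil => intro i; simp [pvSkipWs]
  | cons c rest ih =>
    intro i
    by_cases h : PySem.Chars.isspace c = true
    · simp [pvSkipWs, h, ih]
      ring
    · simp [pvSkipWs, h]

theorem pvRangeMap_snoc (i : Int) (n : Nat) :
    pvRangeMap i (n + 1) = pvRangeMap i n ++ [i + (n : Int)] := by
  simp [pvRangeMap, List.range_succ]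

theorem pvRangeMap_succ (i : Int) : ∀ (n : Nat),
    pvRangeMap i (n + 1) = i :: pvRangeMap (i + 1) n := by
  intro n
  induction n generalizing i with
  | zero => simp [pvRangeMap]
  | succ n ih =>
    rw [pvRangeMap_snoc, ih, pvRangeMap_snoc]
    simp
    ring

theorem enum_takeWhile (q : Char → Bool) : ∀ (l : List Char) (i : Int),
    (PySem.List.enumerate l i).takeWhile (fun p => q p.2)
      = PySem.List.enumerate (l.takeWhile q) i := by
  intro l
  induction l with
  | nil => intro i; simp [PySem.List.enumerate_nil]
  | cons c rest ih =>
    intro i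
    by_cases h : q c = true <;>
      simp [PySem.List.enumerate_cons, h, ih, PySem.List.enumerate_nil]

theorem enum_dropWhile (q : Char → Bool) : ∀ (l : List Char) (i : Int),
    (PySem.List.enumerate l i).dropWhile (fun p => q p.2)
      = PySem.List.enumerate (l.dropWhile q) (i + ((l.takeWhile q).length : Int)) := by
  intro l
  induction l with
  | nil => intro i; simp [PySem.List.enumerate_nil]
  | cons c rest ih =>
    intro i
    by_cases h : q c = true
    · simp [PySem.List.enumerate_cons, h, ih]
      congr 1; ring
    · simp [PySem.List.enumerate_cons, h]

-- A's loop walks a block of non-space characters one character at a time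
theorem pvLoopA_run : ∀ (s l : List Char) (i : Int),
    (∀ c ∈ s, PySem.Chars.isspace c = false) →
    pvLoopA (s ++ l) i
      = (s ++ (pvLoopA l (i + (s.length : Int))).1,
         pvRangeMap i s.length ++ (pvLoopA l (i + (s.length : Int))).2) := by
  intro s
  induction s with
  | nil => intro l i _; simp [pvRangeMap]
  | cons c s ih =>
    intro l i h
    have hc : PySem.Chars.isspace c = false := h c (by simp)
    have hs : ∀ x ∈ s, PySem.Chars.isspace x = false := fun x hx => h x (by simp [hx])
    have harith : i + 1 + (s.length : Int) = i + ((s.length : Int) + 1) := by ring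
    simp only [List.cons_append, pvLoopA, hc, Bool.false_eq_true, if_false,
      ih l (i + 1) hs, pvRangeMap_succ, List.length_cons]
    push_cast
    rw [harith]

theorem pvLoopA_eq : ∀ (n : Nat) (l : List Char) (i : Int), l.length ≤ n →
    pvLoopA l i = ((pvRuns (PySem.List.enumerate l i)).flatMap pvRunChars,
                   (pvRuns (PySem.List.enumerate l i)).flatMap pvRunMap) := by
  intro n
  induction n with
  | zero =>
    intro l i hl
    have : l = [] := List.eq_nil_of_length_eq_zero (Nat.le_zero.mp hl)
    subst this
    simp [pvLoopA, pvRuns, PySem.List.enumerate_nil]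
  | succ m ih =>
    intro l i hl
    match l with
    | [] => simp [pvLoopA, pvRuns, PySem.List.enumerate_nil]
    | c :: rest =>
      have hrest : rest.length ≤ m := by simpa using hl
      rw [PySem.List.enumerate_cons]
      by_cases hc : PySem.Chars.isspace c = true
      · -- whitespace run
        have hq : (fun x => PySem.Chars.isspace x == PySem.Chars.isspace c)
            = PySem.Chars.isspace := by
          funext x; simp [hc]
        have hq2 : (fun p : Int × Char => PySem.Chars.isspace p.2 == PySem.Chars.isspace c)
            = (fun p : Int × Char => PySem.Chars.isspace p.2) := by
          funext p; simp [hc]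
        have hd : (rest.dropWhile PySem.Chars.isspace).length ≤ m :=
          le_trans (List.length_dropWhile_le _ _) hrest
        rw [pvRuns]
        simp only [hq2, enum_dropWhile PySem.Chars.isspace rest (i + 1),
          List.flatMap_cons]
        have hstep : pvLoopA (c :: rest) i
            = (' ' :: (pvLoopA (rest.dropWhile PySem.Chars.isspace)
                  (i + 1 + ((rest.takeWhile PySem.Chars.isspace).length : Int))).1,
               i :: (pvLoopA (rest.dropWhile PySem.Chars.isspace)
                  (i + 1 + ((rest.takeWhile PySem.Chars.isspace).length : Int))).2) := by
          simp [pvLoopA, hc, pvSkipWs_eq]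
        rw [hstep, ih _ _ hd]
        simp [pvRunChars, pvRunMap, hc]
      · -- non-space run: c together with the following non-space characters
        have hcf : PySem.Chars.isspace c = false := by simpa using hc
        set q : Char → Bool := fun x => PySem.Chars.isspace x == PySem.Chars.isspace c with hqdef
        set s := rest.takeWhile q with hsdef
        set rest' := rest.dropWhile q with hrdef
        have hsplit : rest = s ++ rest' := (List.takeWhile_append_dropWhile).symm
        have hns : ∀ x ∈ (c :: s), PySem.Chars.isspace x = false := by
          intro x hx
          rcases List.mem_cons.mp hx with h | h
          · simpa [h] using hcf
          · have hx2 := List.mem_takeWhile_imp h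
            have : PySem.Chars.isspace x == PySem.Chars.isspace c := hx2
            simpa [hcf] using this
        have hd : rest'.length ≤ m := le_trans (List.length_dropWhile_le _ _) hrest
        have hL : pvLoopA (c :: rest) i
            = ((c :: s) ++ (pvLoopA rest' (i + 1 + (s.length : Int))).1,
               pvRangeMap i (s.length + 1)
                 ++ (pvLoopA rest' (i + 1 + (s.length : Int))).2) := by
          conv_lhs => rw [show (c :: rest) = (c :: s) ++ rest' by rw [hsplit]; rfl]
          rw [pvLoopA_run (c :: s) rest' i hns]
          have : i + ((c :: s).length : Int) = i + 1 + (s.length : Int) := by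
            simp; ring
          rw [this]
          simp [pvRangeMap_succ]
        rw [pvRuns]
        have ht : (PySem.List.enumerate rest (i + 1)).takeWhile
            (fun p => PySem.Chars.isspace p.2 == PySem.Chars.isspace c)
            = PySem.List.enumerate s (i + 1) := enum_takeWhile q rest (i + 1)
        have hdw : (PySem.List.enumerate rest (i + 1)).dropWhile
            (fun p => PySem.Chars.isspace p.2 == PySem.Chars.isspace c)
            = PySem.List.enumerate rest' (i + 1 + (s.length : Int)) :=
          enum_dropWhile q rest (i + 1)
        rw [ht, hdw, List.flatMap_cons, List.flatMap_cons, hL,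
          ih rest' (i + 1 + (s.length : Int)) hd]
        have hmap : (PySem.List.enumerate s (i + 1)).map Prod.snd = s := by
          exact PySem.List.map_snd_enumerate s (i + 1)
        simp [pvRunChars, pvRunMap, hmap, hcf, pvRangeMap_succ]

-- ===== VERDICT (by name: the statement is the Claim_ definition above) =====
theorem collapse_whitespace_with_map_py_spec : Claim_equal_collapse_whitespace_with_map_py := by
  intro text _
  unfold Spec_collapse_whitespace_with_map_py
  unfold collapse_whitespace_with_map_py collapse_whitespace_with_map_py_alt
  rw [pvLoopA_eq text.toList.length text.toList 0 le_rfl]
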